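-- pv_equiv track=rewrite | github.com/UlsanCollege-English/week-13-problem-2-course-enrollment-roster-Rohit-coder201 | main.py | build_roster
-- ===== SOURCE A (Python) =====
-- def build_roster(registrations):
--     """
--     Given a list of (student_id, course_id) pairs, build a course roster.
--
--     The result should be a dictionary where:
--       - each key is a course id (string)
--       - each value is a sorted list of unique student ids (strings)
--         enrolled in that course
--
--     Duplicate registrations for the same (student_id, course_id) pair
--     should appear only once in the output.
--     """
--
--     # Build a mapping course_id -> set of unique student_ids
--     rosters = {}
--     for student_id, course_id in registrations:
--         if course_id not in rosters:
--             rosters[course_id] = set()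
--         rosters[course_id].add(student_id)
--
--     # Convert sets to sorted lists
--     for course_id in list(rosters.keys()):
--         rosters[course_id] = sorted(rosters[course_id])
--
--     return rosters
-- ===== SOURCE B (Python) =====
-- def _insert_unique(s, lst):
--     """Return lst with s inserted in sorted position; unchanged if s already present."""
--     out = []
--     i = 0
--     while i < len(lst) and lst[i] < s:
--         out.append(lst[i])
--         i += 1
--     if i < len(lst) and lst[i] == s:
--         return out + lst[i:]
--     return out + [s] + lst[i:]
--
--
-- def build_roster(registrations):
--     # Single pass: keep each course's roster as a sorted duplicate-free list
--     # at all times, so no sets and no final sorting pass are needed.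
--     rosters = {}
--     for student_id, course_id in registrations:
--         rosters[course_id] = _insert_unique(student_id, rosters.get(course_id, []))
--     return rosters
-- ===== Notes on version B (the rewrite author's own statement) =====
-- stated objective: alternative
-- what changed: Instead of collecting a set per course and sorting every roster in a second pass, B makes a single pass that keeps each course's roster as a sorted duplicate-free list via in-place sorted insertion, so sets and the final sorting pass disappear.
import Mathlib
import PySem

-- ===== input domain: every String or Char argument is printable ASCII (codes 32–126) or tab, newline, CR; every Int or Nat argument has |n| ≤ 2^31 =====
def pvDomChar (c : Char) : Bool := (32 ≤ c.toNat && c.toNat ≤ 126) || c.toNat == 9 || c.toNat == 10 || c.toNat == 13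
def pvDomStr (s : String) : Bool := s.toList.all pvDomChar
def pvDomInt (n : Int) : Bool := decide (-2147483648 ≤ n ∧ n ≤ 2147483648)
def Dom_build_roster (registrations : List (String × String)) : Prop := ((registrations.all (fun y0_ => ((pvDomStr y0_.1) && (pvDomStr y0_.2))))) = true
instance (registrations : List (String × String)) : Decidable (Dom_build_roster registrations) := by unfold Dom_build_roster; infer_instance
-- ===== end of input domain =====

-- B replaces A's per-course sets plus a final sorting pass by a single pass that keeps each
-- course's roster as a sorted duplicate-free list at all times (objective: alternative).


-- ===== PORT A =====
-- The first loop's 'if course_id not in rosters: rosters[course_id] = set(); rosters[course_id].add(student_id)'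
-- is exactly 'rosters[course_id] = (rosters.get(course_id, set())).add(student_id)', i.e. Dict.modify with default
-- Set.empty.  The second loop rewrites each existing key in place (insert overwrites, keeping position), and the
-- dict-as-association-list result is its items.
def build_roster (registrations : List (String × String)) : List (String × List String) :=
  let rosters : PySem.Dict String (PySem.Set String) :=
    registrations.foldl
      (fun d p => d.modify p.2 PySem.Set.empty (fun s => PySem.Set.add s p.1)) PySem.Dict.empty
  (rosters.keys.foldl
      (fun d k => d.insert k (PySem.List.sorted (d.getD k []) (fun x => x) false)) rosters).items

-- ===== PORT B =====
-- _insert_unique(s, lst): scan past the elements below s, then either keep lst (s already there)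
-- or splice s in at that point.
def insertUnique (s : String) : List String → List String
  | [] => [s]
  | y :: t => if y < s then y :: insertUnique s t else if y == s then y :: t else s :: y :: t

def build_roster_alt (registrations : List (String × String)) : List (String × List String) :=
  (registrations.foldl
      (fun d p => d.insert p.2 (insertUnique p.1 (d.getD p.2 []))) PySem.Dict.empty).items

-- ===== PRECONDITION & SPEC =====
def Spec_build_roster (registrations : List (String × String)) (out : List (String × List String)) : Prop := out = build_roster_alt registrations
instance (registrations : List (String × String)) (out : List (String × List String)) : Decidable (Spec_build_roster registrations out) := by unfold Spec_build_roster; infer_instance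

-- ===== CLAIM (what is proved, stated in full; the proofs are below) =====
def Claim_equal_build_roster : Prop := ∀ (registrations : List (String × String)), Dom_build_roster registrations → Spec_build_roster registrations (build_roster registrations)

-- ===== LEMMAS AND PROOFS =====

theorem mem_insertUnique (s x : String) (l : List String) :
    x ∈ insertUnique s l ↔ x = s ∨ x ∈ l := by
  induction l with
  | nil => simp [insertUnique]
  | cons y t ih =>
    simp only [insertUnique]
    split_ifs with h1 h2
    · simp [ih]; tauto
    · have hys : y = s := by simpa using h2
      subst hys; simp [List.mem_cons]
    · simp [List.mem_cons]

theorem insertUnique_of_mem (s : String) (l : List String)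
    (hs : l.Pairwise (· < ·)) (hm : s ∈ l) : insertUnique s l = l := by
  induction l with
  | nil => simp at hm
  | cons y t ih =>
    rw [List.pairwise_cons] at hs
    rcases List.mem_cons.mp hm with rfl | hmt
    · simp [insertUnique]
    · have hys : y < s := hs.1 s hmt
      simp [insertUnique, hys, ih hs.2 hmt]

theorem insertUnique_perm (s : String) (l : List String) (hm : s ∉ l) :
    (insertUnique s l).Perm (s :: l) := by
  induction l with
  | nil => simp [insertUnique]
  | cons y t ih =>
    have hmt : s ∉ t := fun h => hm (List.mem_cons_of_mem _ h)
    simp only [insertUnique]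
    split_ifs with h1 h2
    · exact (((ih hmt).cons y).trans (List.Perm.swap s y t))
    · exact absurd (by simpa using h2 : y = s).symm
        (fun h => hm (h ▸ List.mem_cons_self))
    · exact List.Perm.refl _

theorem insertUnique_pairwise (s : String) (l : List String)
    (hs : l.Pairwise (· < ·)) (hm : s ∉ l) : (insertUnique s l).Pairwise (· < ·) := by
  induction l with
  | nil => simp [insertUnique]
  | cons y t ih =>
    rw [List.pairwise_cons] at hs
    have hmt : s ∉ t := fun h => hm (List.mem_cons_of_mem _ h)
    simp only [insertUnique]
    split_ifs with h1 h2
    · refine List.pairwise_cons.mpr ⟨?_, ih hs.2 hmt⟩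
      intro x hx
      rcases (mem_insertUnique s x t).mp hx with rfl | hxt
      · exact h1
      · exact hs.1 x hxt
    · exact absurd (by simpa using h2 : y = s) (fun h => hm (h ▸ List.mem_cons_self))
    · have hsy : s < y := lt_of_le_of_ne (not_lt.mp h1) (fun h => hm (h ▸ List.mem_cons_self))
      refine List.pairwise_cons.mpr ⟨?_, List.pairwise_cons.mpr hs⟩
      intro x hx
      rcases List.mem_cons.mp hx with rfl | hxt
      · exact hsy
      · exact hsy.trans (hs.1 x hxt)

-- sorted(set) of a duplicate-free list is strictly increasing
theorem sorted_nodup_pairwise_lt (S : List String) (hnd : S.Nodup) :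
    (PySem.List.sorted S (fun x => x) false).Pairwise (· < ·) := by
  have hle := PySem.List.sorted_pairwise S (fun x => x)
  have hnd' : (PySem.List.sorted S (fun x => x) false).Nodup :=
    (PySem.List.sorted_perm S (fun x => x) false).nodup_iff.mpr hnd
  have hne : (PySem.List.sorted S (fun x => x) false).Pairwise (· ≠ ·) := hnd'
  exact (hle.and hne).imp (fun ⟨h1, h2⟩ => lt_of_le_of_ne h1 h2)

-- the key step: inserting into the sorted picture of a set = the sorted picture after Set.add
theorem insertUnique_sorted_add (S : PySem.Set String) (hnd : S.Nodup) (s : String) :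
    insertUnique s (PySem.List.sorted S (fun x => x) false)
      = PySem.List.sorted (PySem.Set.add S s) (fun x => x) false := by
  by_cases hm : s ∈ S
  · rw [PySem.Set.add_of_mem hm]
    exact insertUnique_of_mem s _ (sorted_nodup_pairwise_lt S hnd)
      ((PySem.List.mem_sorted S (fun x => x) false s).mpr hm)
  · have hadd : PySem.Set.add S s = S ++ [s] := PySem.Set.add_of_not_mem hm
    have hms : s ∉ PySem.List.sorted S (fun x => x) false := by
      rw [PySem.List.mem_sorted]; exact hm
    have hperm : (insertUnique s (PySem.List.sorted S (fun x => x) false)).Perm (S ++ [s]) := by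
      refine (insertUnique_perm s _ hms).trans ?_
      refine ((PySem.List.sorted_perm S (fun x => x) false).cons s).trans ?_
      simpa using (List.perm_append_singleton s S).symm
    rw [hadd]
    exact (PySem.List.sorted_eq_of_perm_of_pairwise_lt _ _ _ hperm
      (insertUnique_pairwise s _ (sorted_nodup_pairwise_lt S hnd) hms)).symm

-- B's roster for one course: folding _insert_unique over the students = sorted(set(students))
theorem foldl_insertUnique_eq_sorted (xs : List String) :
    xs.foldl (fun acc s => insertUnique s acc) []
      = PySem.List.sorted (PySem.Set.ofList xs) (fun x => x) false := by
  suffices h : ∀ (S : PySem.Set String), S.Nodup →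
      xs.foldl (fun acc s => insertUnique s acc) (PySem.List.sorted S (fun x => x) false)
        = PySem.List.sorted (List.foldl PySem.Set.add S xs) (fun x => x) false by
    simpa [PySem.Set.ofList, PySem.Set.empty, PySem.List.sorted] using
      h [] List.nodup_nil
  induction xs with
  | nil => intro S _; rfl
  | cons x t ih =>
    intro S hnd
    simp only [List.foldl_cons]
    rw [insertUnique_sorted_add S hnd x]
    exact ih (PySem.Set.add S x) (by
      by_cases hm : x ∈ S
      · rwa [PySem.Set.add_of_mem hm]
      · rw [PySem.Set.add_of_not_mem hm]
        simp only [List.nodup_append, List.nodup_singleton, true_and, hnd]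
        intro a ha b hb
        rw [List.mem_singleton] at hb
        subst hb
        exact fun h => hm (h ▸ ha))

-- phase 1 of A, pointwise: the set collected for course c
theorem getD_foldA (l : List (String × String)) (d : PySem.Dict String (PySem.Set String)) (c : String) :
    (l.foldl (fun d p => d.modify p.2 PySem.Set.empty (fun s => PySem.Set.add s p.1)) d).getD c []
      = List.foldl PySem.Set.add (d.getD c [])
          ((l.filter (fun p => p.2 == c)).map (fun p => p.1)) := by
  induction l generalizing d with
  | nil => simp [PySem.Set.empty]
  | cons p t ih =>
    simp only [List.foldl_cons]
    rw [ih]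
    by_cases hc : p.2 = c
    · simp [hc, PySem.Set.empty]
    · simp [hc, PySem.Dict.getD_modify, Ne.symm hc]

-- B's loop, pointwise: the roster built for course c
theorem getD_foldB (l : List (String × String)) (d : PySem.Dict String (List String)) (c : String) :
    (l.foldl (fun d p => d.insert p.2 (insertUnique p.1 (d.getD p.2 []))) d).getD c []
      = ((l.filter (fun p => p.2 == c)).map (fun p => p.1)).foldl
          (fun acc s => insertUnique s acc) (d.getD c []) := by
  induction l generalizing d with
  | nil => simp
  | cons p t ih =>
    simp only [List.foldl_cons]
    rw [ih]
    by_cases hc : p.2 = c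
    · simp [hc]
    · simp [hc, PySem.Dict.getD_insert, Ne.symm hc]

-- A's second loop, pointwise: every key listed gets its value replaced by its sorted form
theorem getD_fold2 (ks : List String) (d : PySem.Dict String (List String))
    (hnd : ks.Nodup) (j : String) :
    (ks.foldl (fun d k => d.insert k (PySem.List.sorted (d.getD k []) (fun x => x) false)) d).getD j []
      = if j ∈ ks then PySem.List.sorted (d.getD j []) (fun x => x) false else d.getD j [] := by
  induction ks generalizing d with
  | nil => simp
  | cons k t ih =>
    rw [List.nodup_cons] at hnd
    simp only [List.foldl_cons]
    rw [ih _ hnd.2]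
    by_cases hjk : j = k
    · subst hjk
      simp [hnd.1, PySem.Dict.getD_insert_self]
    · simp [PySem.Dict.getD_insert_of_ne _ _ _ hjk, List.mem_cons, hjk]

-- Set.update of a set by its own elements changes nothing
theorem update_self_of_subset (l : List String) (s : PySem.Set String)
    (h : ∀ x ∈ l, x ∈ s) : PySem.Set.update s l = s := by
  induction l generalizing s with
  | nil => rfl
  | cons x t ih =>
    have : PySem.Set.add s x = s := PySem.Set.add_of_mem (h x List.mem_cons_self)
    calc PySem.Set.update s (x :: t)
        = PySem.Set.update (PySem.Set.add s x) t := rfl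
      _ = PySem.Set.update s t := by rw [this]
      _ = s := ih s (fun y hy => h y (List.mem_cons_of_mem _ hy))

-- ===== VERDICT (by name: the statement is the Claim_ definition above) =====
theorem build_roster_spec : Claim_equal_build_roster := by
  intro l _
  unfold Spec_build_roster build_roster build_roster_alt
  simp only []
  set dA : PySem.Dict String (PySem.Set String) :=
    l.foldl (fun d p => d.modify p.2 PySem.Set.empty (fun s => PySem.Set.add s p.1))
      PySem.Dict.empty with hdA
  set dB : PySem.Dict String (List String) :=
    l.foldl (fun d p => d.insert p.2 (insertUnique p.1 (d.getD p.2 []))) PySem.Dict.empty with hdB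
  have hkA : dA.keys = PySem.Set.ofList (l.map (fun p => p.2)) := by
    rw [hdA, PySem.Dict.keys_foldl_modify_key l (fun p => p.2) PySem.Set.empty
      (fun _ p => fun s => PySem.Set.add s p.1) PySem.Dict.empty]
    simp [PySem.Set.update_nil_left]
  have hkB : dB.keys = PySem.Set.ofList (l.map (fun p => p.2)) := by
    rw [hdB, PySem.Dict.keys_foldl_insert_key l (fun p => p.2)
      (fun d p => insertUnique p.1 (d.getD p.2 [])) PySem.Dict.empty]
    simp [PySem.Set.update_nil_left]
  have hndA : dA.keys.Nodup := by
    rw [hkA]; exact PySem.Set.nodup_ofList _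
  have hndB : dB.keys.Nodup := by
    rw [hkB]; exact PySem.Set.nodup_ofList _
  -- per-course values agree
  have hval : ∀ c : String,
      PySem.List.sorted (dA.getD c []) (fun x => x) false = dB.getD c [] := by
    intro c
    rw [hdA, hdB, getD_foldA, getD_foldB]
    simp only [PySem.Dict.getD_empty]
    rw [foldl_insertUnique_eq_sorted]
    rfl
  -- A's second loop
  set d2 : PySem.Dict String (List String) :=
    dA.keys.foldl (fun d k => d.insert k (PySem.List.sorted (d.getD k []) (fun x => x) false)) dA
    with hd2
  have hk2 : d2.keys = dA.keys := by
    rw [hd2, PySem.Dict.keys_foldl_insert_key dA.keys (fun k => k)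
      (fun d k => PySem.List.sorted (d.getD k []) (fun x => x) false) dA]
    simp only [List.map_id_fun', id]
    exact update_self_of_subset dA.keys dA.keys (fun x hx => hx)
  have hnd2 : d2.keys.Nodup := hk2 ▸ hndA
  have hgd2 : ∀ j, d2.getD j [] = if j ∈ dA.keys
      then PySem.List.sorted (dA.getD j []) (fun x => x) false else dA.getD j [] := by
    intro j; rw [hd2]; exact getD_fold2 dA.keys dA hndA j
  rw [PySem.Dict.items_eq_map_keys d2 hnd2 [], PySem.Dict.items_eq_map_keys dB hndB [],
    hk2, hkA, hkB]
  refine List.map_congr_left ?_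
  intro k hk
  have hkmem : k ∈ dA.keys := by rw [hkA]; exact hk
  rw [hgd2 k, if_pos hkmem, hval k]
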